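-- pv_equiv track=rewrite | github.com/SmithaNarasimhamurthy/DSA | dsa/Arrays/factorial.py | large_factorial
-- ===== SOURCE A (Python) =====
-- def large_factorial(n):
--     result = [1]  # Store digits of factorial
--
--     for i in range(2, n + 1):
--         carry = 0
--         for j in range(len(result)):
--             temp = result[j] * i + carry
--             result[j] = temp % 10  # Store last digit
--             carry = temp // 10  # Carry forward
--
--         while carry:
--             result.append(carry % 10)
--             carry //= 10
--
--     return ''.join(map(str, result[::-1]))  # Convert list to string
-- ===== SOURCE B (Python) =====
-- def large_factorial(n):
--     # binary-split product of 2..n on native big ints, then extract decimal digits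
--     def prod(lo, hi):
--         if lo > hi:
--             return 1
--         if lo == hi:
--             return lo
--         mid = (lo + hi) // 2
--         return prod(lo, mid) * prod(mid + 1, hi)
--
--     x = prod(2, n)
--     out = []
--     while x >= 10:
--         out.append(str(x % 10))
--         x //= 10
--     out.append(str(x))
--     return ''.join(reversed(out))
-- ===== Notes on version B (the rewrite author's own statement) =====
-- stated objective: faster
-- what changed: Replaces the per-decimal-digit schoolbook multiply-by-i loop with a binary-split product of 2..n on native big integers, followed by a single digit-extraction loop to build the string.
import Mathlib
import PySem

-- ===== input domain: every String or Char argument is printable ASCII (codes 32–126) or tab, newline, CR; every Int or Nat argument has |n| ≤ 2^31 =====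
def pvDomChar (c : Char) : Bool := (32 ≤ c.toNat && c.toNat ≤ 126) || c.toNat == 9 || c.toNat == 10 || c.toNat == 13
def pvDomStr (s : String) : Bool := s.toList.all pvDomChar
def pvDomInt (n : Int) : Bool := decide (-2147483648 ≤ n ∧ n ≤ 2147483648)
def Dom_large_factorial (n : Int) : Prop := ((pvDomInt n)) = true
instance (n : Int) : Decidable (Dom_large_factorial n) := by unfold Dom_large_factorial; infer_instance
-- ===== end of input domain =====

-- B replaces A's per-decimal-digit schoolbook multiplication loop by a binary-split
-- big-integer product of 2..n followed by one digit-extraction loop (measured faster).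


-- ===== PORT A =====
-- inner 'for j in range(len(result))' loop: rewrites each digit left to right, threading carry
def pvMulLoop (i : Int) : List Int → Int → List Int × Int
  | [], carry => ([], carry)
  | d :: ds, carry =>
    let temp := d * i + carry
    let r := pvMulLoop i ds (PySem.Int.floordiv temp 10)
    (PySem.Int.mod temp 10 :: r.1, r.2)

-- 'while carry: result.append(carry % 10); carry //= 10' — the digits this loop appends.
-- The 'c ≤ 0' branch is a totality guard only: in A carry is always ≥ 0 and the loop exits at 0.
def pvCarryLoop (c : Int) : List Int :=
  if 0 < c then
    PySem.Int.mod c 10 :: pvCarryLoop (PySem.Int.floordiv c 10)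
  else []
termination_by c.toNat
decreasing_by
  rw [PySem.Int.floordiv_eq_ediv_of_pos (by omega : (0:Int) < 10)]
  omega

-- one iteration of 'for i in range(2, n+1)'
def pvStep (result : List Int) (i : Int) : List Int :=
  let p := pvMulLoop i result 0
  p.1 ++ pvCarryLoop p.2

def large_factorial (n : Int) : String :=
  let result := (PySem.List.pyRange 2 (n + 1) 1).foldl pvStep [1]
  PySem.Str.join "" (List.map PySem.Int.toStr ((PySem.List.slice? result none none (-1)).getD []))

-- ===== PORT B =====
-- binary-split product of the integers lo..hi (inclusive)
def pvProd (lo hi : Int) : Int :=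
  if lo > hi then 1
  else if lo = hi then lo
  else
    let mid := PySem.Int.floordiv (lo + hi) 2
    pvProd lo mid * pvProd (mid + 1) hi
termination_by (hi - lo).toNat
decreasing_by
  · rw [PySem.Int.floordiv_eq_ediv_of_pos (by omega : (0:Int) < 2)]
    omega
  · rw [PySem.Int.floordiv_eq_ediv_of_pos (by omega : (0:Int) < 2)]
    omega

-- 'while x >= 10: out.append(str(x % 10)); x //= 10' then the final 'out.append(str(x))'
def pvToDec (x : Int) (out : List String) : List String :=
  if 10 ≤ x then
    pvToDec (PySem.Int.floordiv x 10) (out ++ [PySem.Int.toStr (PySem.Int.mod x 10)])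
  else out ++ [PySem.Int.toStr x]
termination_by x.toNat
decreasing_by
  rw [PySem.Int.floordiv_eq_ediv_of_pos (by omega : (0:Int) < 10)]
  omega

def large_factorial_alt (n : Int) : String :=
  let x := pvProd 2 n
  let out := pvToDec x []
  PySem.Str.join "" out.reverse

-- ===== PRECONDITION & SPEC =====
def Spec_large_factorial (n : Int) (out : String) : Prop := out = large_factorial_alt n
instance (n : Int) (out : String) : Decidable (Spec_large_factorial n out) := by unfold Spec_large_factorial; infer_instance

-- ===== CLAIM (what is proved, stated in full; the proofs are below) =====
def Claim_equal_large_factorial : Prop := ∀ (n : Int), Dom_large_factorial n → Spec_large_factorial n (large_factorial n)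

-- ===== LEMMAS AND PROOFS =====

-- Nat model of the inner multiply loop
def natMulLoop (I : Nat) : List Nat → Nat → List Nat × Nat
  | [], c => ([], c)
  | d :: ds, c =>
    let t := d * I + c
    let r := natMulLoop I ds (t / 10)
    (t % 10 :: r.1, r.2)

theorem pvMulLoop_cast (I : Nat) (L : List Nat) (c : Nat) :
    pvMulLoop (I : Int) (L.map Int.ofNat) (c : Int) =
      ((natMulLoop I L c).1.map Int.ofNat, ((natMulLoop I L c).2 : Int)) := by
  induction L generalizing c with
  | nil => simp [pvMulLoop, natMulLoop]
  | cons d ds ih =>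
    simp only [natMulLoop, List.map_cons, pvMulLoop]
    have ht : (Int.ofNat d) * I + c = ((d * I + c : Nat) : Int) := by
      simp only [Int.ofNat_eq_natCast]; push_cast; ring
    have h10 : (10 : Int) = ((10 : Nat) : Int) := by norm_num
    rw [ht, h10, PySem.Int.floordiv_natCast, PySem.Int.mod_natCast, ih]
    simp [Int.ofNat_eq_natCast]

theorem natMulLoop_value (I : Nat) (L : List Nat) (c : Nat) :
    Nat.ofDigits 10 (natMulLoop I L c).1 + (natMulLoop I L c).2 * 10 ^ L.length =
      Nat.ofDigits 10 L * I + c := by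
  induction L generalizing c with
  | nil => simp [natMulLoop]
  | cons d ds ih =>
    simp only [natMulLoop, Nat.ofDigits_cons, List.length_cons]
    set t := d * I + c with hts
    calc t % 10 + 10 * Nat.ofDigits 10 (natMulLoop I ds (t / 10)).1
          + (natMulLoop I ds (t / 10)).2 * 10 ^ (ds.length + 1)
        = t % 10 + 10 * (Nat.ofDigits 10 (natMulLoop I ds (t / 10)).1
            + (natMulLoop I ds (t / 10)).2 * 10 ^ ds.length) := by ring
      _ = t % 10 + 10 * (Nat.ofDigits 10 ds * I + t / 10) := by rw [ih]
      _ = (t % 10 + 10 * (t / 10)) + 10 * Nat.ofDigits 10 ds * I := by ring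
      _ = t + 10 * Nat.ofDigits 10 ds * I := by rw [Nat.mod_add_div]
      _ = (d + 10 * Nat.ofDigits 10 ds) * I + c := by rw [hts]; ring

theorem natMulLoop_lt (I : Nat) (L : List Nat) (c : Nat) :
    ∀ x ∈ (natMulLoop I L c).1, x < 10 := by
  induction L generalizing c with
  | nil => simp [natMulLoop]
  | cons d ds ih =>
    simp only [natMulLoop, List.mem_cons]
    rintro x (rfl | hx)
    · exact Nat.mod_lt _ (by norm_num)
    · exact ih _ x hx

theorem natMulLoop_len (I : Nat) (L : List Nat) (c : Nat) :
    (natMulLoop I L c).1.length = L.length := by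
  induction L generalizing c with
  | nil => rfl
  | cons d ds ih => simp [natMulLoop, ih]

theorem pvCarryLoop_digits (c : Nat) :
    pvCarryLoop (c : Int) = (Nat.digits 10 c).map Int.ofNat := by
  induction c using Nat.strong_induction_on with
  | _ c ih =>
    rw [pvCarryLoop]
    by_cases hc : 0 < c
    · rw [if_pos (by exact_mod_cast hc)]
      have h10 : (10 : Int) = ((10 : Nat) : Int) := by norm_num
      rw [h10, PySem.Int.floordiv_natCast, PySem.Int.mod_natCast,
        ih (c / 10) (Nat.div_lt_self hc (by norm_num)),
        Nat.digits_def' (by norm_num : 1 < 10) hc]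
      simp
    · have hc0 : c = 0 := by omega
      subst hc0
      simp

-- the key step, in ℕ: one multiply-and-carry pass maps the digit list of M to that of M * I
theorem natStep_digits (M I : Nat) (hM : 1 ≤ M) (hI : 1 ≤ I) :
    (natMulLoop I (Nat.digits 10 M) 0).1 ++
        Nat.digits 10 (natMulLoop I (Nat.digits 10 M) 0).2 =
      Nat.digits 10 (M * I) := by
  have hval := natMulLoop_value I (Nat.digits 10 M) 0
  have hlt := natMulLoop_lt I (Nat.digits 10 M) 0
  have hlen := natMulLoop_len I (Nat.digits 10 M) 0
  rcases hP : natMulLoop I (Nat.digits 10 M) 0 with ⟨L1, c1⟩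
  rw [hP] at hval hlt hlen
  simp only at hval hlt hlen
  rw [Nat.ofDigits_digits, Nat.add_zero] at hval
  have hof : Nat.ofDigits 10 (L1 ++ Nat.digits 10 c1) = M * I := by
    rw [Nat.ofDigits_append, Nat.ofDigits_digits, hlen, ← hval]; ring
  have hlt2 : ∀ x ∈ L1 ++ Nat.digits 10 c1, x < 10 := by
    intro x hx
    rcases List.mem_append.mp hx with hx | hx
    · exact hlt x hx
    · exact Nat.digits_lt_base (by norm_num) hx
  have hlast : ∀ h : L1 ++ Nat.digits 10 c1 ≠ [],
      (L1 ++ Nat.digits 10 c1).getLast h ≠ 0 := by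
    intro h
    by_cases hc : c1 = 0
    · subst hc
      simp only [Nat.digits_zero, List.append_nil] at h ⊢
      intro hz
      -- a zero last digit would force ofDigits L1 < 10 ^ (len - 1) ≤ M ≤ M * I
      have hMlen : (Nat.digits 10 M).length = Nat.log 10 M + 1 :=
        Nat.length_digits 10 M (by norm_num) (by omega)
      have hdrop : L1.dropLast ++ [0] = L1 := by
        conv_rhs => rw [← List.dropLast_append_getLast h]
        rw [hz]
      have hofL1 : Nat.ofDigits 10 L1 = M * I := by omega
      have hlt' : Nat.ofDigits 10 L1.dropLast < 10 ^ L1.dropLast.length :=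
        Nat.ofDigits_lt_base_pow_length (by norm_num)
          (fun x hx => hlt x (List.dropLast_sublist _ |>.mem hx))
      have hofdrop : Nat.ofDigits 10 L1 = Nat.ofDigits 10 L1.dropLast := by
        rw [← hdrop, Nat.ofDigits_append]
        simp [Nat.ofDigits]
      have hdl : L1.dropLast.length = Nat.log 10 M := by
        have hne0 : 0 < L1.length := List.length_pos_iff.mpr h
        rw [List.length_dropLast, hlen, hMlen]
        omega
      have hpow : 10 ^ Nat.log 10 M ≤ M := Nat.pow_log_le_self 10 (by omega)
      have hMI : M ≤ M * I := Nat.le_mul_of_pos_right M (by omega)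
      rw [hofdrop] at hofL1
      rw [hdl] at hlt'
      omega
    · rw [List.getLast_append_of_ne_nil h (Nat.digits_ne_nil_iff_ne_zero.mpr hc)]
      exact Nat.getLast_digit_ne_zero 10 hc
  rw [← hof]
  exact (Nat.digits_ofDigits 10 (by norm_num) _ hlt2 hlast).symm

-- the same step on A's Int-valued digit list
theorem pvStep_digits (M I : Nat) (hM : 1 ≤ M) (hI : 1 ≤ I) :
    pvStep ((Nat.digits 10 M).map Int.ofNat) (I : Int) =
      (Nat.digits 10 (M * I)).map Int.ofNat := by
  unfold pvStep
  dsimp only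
  have h0 : (0 : Int) = ((0 : Nat) : Int) := rfl
  rw [h0, pvMulLoop_cast I (Nat.digits 10 M) 0]
  dsimp only
  rw [pvCarryLoop_digits, ← List.map_append, natStep_digits M I hM hI]

theorem foldA (b : Int) :
    (PySem.List.pyRange 2 (b + 1) 1).foldl pvStep [1] =
      (Nat.digits 10 (Nat.factorial b.toNat)).map Int.ofNat := by
  by_cases hb : b ≤ 1
  · rw [PySem.List.pyRange_one_eq_nil (by omega), List.foldl_nil]
    have h01 : b.toNat = 0 ∨ b.toNat = 1 := by omega
    have hf : Nat.factorial b.toNat = 1 := by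
      rcases h01 with h | h <;> rw [h] <;> rfl
    rw [hf]
    rfl
  · have h2b : (2 : Int) ≤ b := by omega
    rw [PySem.List.pyRange_one_succ_right (by omega : (2 : Int) ≤ b), List.foldl_append]
    have ih := foldA (b - 1)
    rw [show b - 1 + 1 = b from by ring] at ih
    rw [ih, List.foldl_cons, List.foldl_nil]
    have hbcast : b = ((b.toNat : Nat) : Int) := (Int.toNat_of_nonneg (by omega)).symm
    have hstep := pvStep_digits ((b - 1).toNat.factorial) b.toNat (Nat.factorial_pos _) (by omega)
    rw [← hbcast] at hstep
    rw [hstep]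
    have hsucc : b.toNat = (b - 1).toNat + 1 := by omega
    have hfact : (b - 1).toNat.factorial * b.toNat = b.toNat.factorial := by
      rw [hsucc, Nat.factorial_succ]; ring
    rw [hfact]
termination_by b.toNat
decreasing_by omega

-- rising product lo * (lo+1) * ... * (lo+k-1)
def rp (lo : Int) : Nat → Int
  | 0 => 1
  | k + 1 => rp lo k * (lo + k)

theorem rp_add (lo : Int) (a b : Nat) :
    rp lo (a + b) = rp lo a * rp (lo + a) b := by
  induction b with
  | zero => simp [rp]
  | succ b ih =>
    have : a + (b + 1) = (a + b) + 1 := by omega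
    rw [this, rp, rp, ih]
    push_cast
    ring

theorem pvProd_rp (lo hi : Int) : pvProd lo hi = rp lo (hi - lo + 1).toNat := by
  rw [pvProd]
  by_cases h1 : lo > hi
  · rw [if_pos h1, show (hi - lo + 1).toNat = 0 from by omega]
    rfl
  · rw [if_neg h1]
    by_cases h2 : lo = hi
    · rw [if_pos h2]
      subst h2
      rw [show (lo - lo + 1).toNat = 1 from by omega]
      simp [rp]
    · rw [if_neg h2]
      dsimp only
      have hlt : lo < hi := by omega
      have hm : lo ≤ PySem.Int.floordiv (lo + hi) 2 ∧ PySem.Int.floordiv (lo + hi) 2 < hi := by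
        rw [PySem.Int.floordiv_eq_ediv_of_pos (by omega : (0 : Int) < 2)]
        omega
      set mid := PySem.Int.floordiv (lo + hi) 2 with hmid
      rw [pvProd_rp lo mid, pvProd_rp (mid + 1) hi]
      rw [show (hi - lo + 1).toNat = (mid - lo + 1).toNat + (hi - mid).toNat from by omega,
        rp_add]
      congr 2
      · omega
      · omega
termination_by (hi - lo).toNat
decreasing_by
  · omega
  · omega

theorem pvProd_fact (n : Int) : pvProd 2 n = (Nat.factorial n.toNat : Int) := by
  have key : ∀ k : Nat, rp 2 k = (Nat.factorial (k + 1) : Int) := by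
    intro k
    induction k with
    | zero => rfl
    | succ k ih =>
      rw [rp, ih]
      have h2 : Nat.factorial (k + 1 + 1) = (k + 2) * Nat.factorial (k + 1) := by
        rw [Nat.factorial_succ]
      rw [h2]
      push_cast
      ring
  rw [pvProd_rp]
  by_cases hn : 1 ≤ n
  · rw [key]
    congr 2
    omega
  · rw [show (n - 2 + 1).toNat = 0 from by omega, show n.toNat = 0 from by omega]
    rfl

theorem pvToDec_digits (F : Nat) (hF : 1 ≤ F) (out : List String) :
    pvToDec (F : Int) out =
      out ++ (Nat.digits 10 F).map (fun d => PySem.Int.toStr (Int.ofNat d)) := by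
  induction F using Nat.strong_induction_on generalizing out with
  | _ F ih =>
    rw [pvToDec]
    by_cases h10 : 10 ≤ F
    · rw [if_pos (by exact_mod_cast h10)]
      have hc : (10 : Int) = ((10 : Nat) : Int) := by norm_num
      rw [hc, PySem.Int.floordiv_natCast, PySem.Int.mod_natCast]
      rw [ih (F / 10) (Nat.div_lt_self (by omega) (by norm_num)) (by omega)]
      rw [Nat.digits_def' (by norm_num : 1 < 10) (by omega : 0 < F)]
      simp only [List.map_cons, List.append_assoc, List.singleton_append, Int.ofNat_eq_natCast]
    · rw [if_neg (by exact_mod_cast h10)]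
      rw [Nat.digits_of_lt 10 F (by omega) (by omega)]
      simp

-- ===== VERDICT (by name: the statement is the Claim_ definition above) =====
theorem large_factorial_spec : Claim_equal_large_factorial := by
  intro n _
  unfold Spec_large_factorial large_factorial large_factorial_alt
  dsimp only
  rw [foldA n, pvProd_fact n, pvToDec_digits _ (Nat.one_le_iff_ne_zero.mpr (Nat.factorial_ne_zero _)) []]
  rw [PySem.List.slice?_none_none_neg_one]
  simp [List.map_reverse, Function.comp_def, Int.ofNat_eq_natCast]
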